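-- pv_equiv track=rewrite | github.com/stjude/proteinpaint | utils/jwang/mutationpersample.py | HIGH_LEVEL_COM
-- ===== SOURCE A (Python) =====
-- def HIGH_LEVEL_COM(TermL):
-- 	TERM = ''
-- 	TermIDX = 0
-- 	TERMIDX = 0
-- 	for x,t in enumerate(TermL):
-- 		if not t:
-- 			continue
-- 		if not TERM:
-- 			TERM = t
-- 			TermIDX = VEPTerm.index(TERM)
-- 			TERMIDX = x
-- 		else:
-- 			if VEPTerm.index(t) < TermIDX:
-- 				TERM = t
-- 				TermIDX = VEPTerm.index(t)
-- 				TERMIDX = x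
-- 			else:
-- 				continue
-- 	return TERM,TERMIDX
--
-- VEPTerm = ['transcript_ablation', 'splice_acceptor_variant', 'splice_donor_variant', 'stop_gained', \
-- 	'frameshift_variant', 'stop_lost', 'start_lost', 'transcript_amplification', 'inframe_insertion', \
-- 	'inframe_deletion', 'missense_variant', 'protein_altering_variant', 'splice_region_variant', \
-- 	'incomplete_terminal_codon_variant', 'start_retained_variant','stop_retained_variant', 'synonymous_variant', 'coding_sequence_variant', \
-- 	'mature_miRNA_variant', '5_prime_UTR_variant', '3_prime_UTR_variant', 'non_coding_transcript_exon_variant', \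
-- 	'intron_variant', 'NMD_transcript_variant', 'non_coding_transcript_variant', 'upstream_gene_variant', \
-- 	'downstream_gene_variant', 'TFBS_ablation', 'TFBS_amplification', 'TF_binding_site_variant', \
-- 	'regulatory_region_ablation', 'regulatory_region_amplification', 'feature_elongation', \
-- 	'regulatory_region_variant', 'feature_truncation', 'intergenic_variant']
-- ===== SOURCE B (Python) =====
-- VEPTerm = ['transcript_ablation', 'splice_acceptor_variant', 'splice_donor_variant', 'stop_gained', \
-- 	'frameshift_variant', 'stop_lost', 'start_lost', 'transcript_amplification', 'inframe_insertion', \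
-- 	'inframe_deletion', 'missense_variant', 'protein_altering_variant', 'splice_region_variant', \
-- 	'incomplete_terminal_codon_variant', 'start_retained_variant','stop_retained_variant', 'synonymous_variant', 'coding_sequence_variant', \
-- 	'mature_miRNA_variant', '5_prime_UTR_variant', '3_prime_UTR_variant', 'non_coding_transcript_exon_variant', \
-- 	'intron_variant', 'NMD_transcript_variant', 'non_coding_transcript_variant', 'upstream_gene_variant', \
-- 	'downstream_gene_variant', 'TFBS_ablation', 'TFBS_amplification', 'TF_binding_site_variant', \
-- 	'regulatory_region_ablation', 'regulatory_region_amplification', 'feature_elongation', \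
-- 	'regulatory_region_variant', 'feature_truncation', 'intergenic_variant']
--
--
-- def HIGH_LEVEL_COM(TermL):
-- 	cands = [(x, t) for x, t in enumerate(TermL) if t]
-- 	if not cands:
-- 		return '', 0
-- 	x, t = min(cands, key=lambda c: VEPTerm.index(c[1]))
-- 	return t, x
-- ===== Notes on version B (the rewrite author's own statement) =====
-- stated objective: idiomatic
-- what changed: A's three-variable min-tracking loop over enumerate is replaced by building the filtered candidate list of (index, term) pairs and taking min(cands, key=rank) (Python min keeps the first minimum, matching A's earliest-wins tie-break), with ('', 0) for an empty candidate list.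
import Mathlib
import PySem

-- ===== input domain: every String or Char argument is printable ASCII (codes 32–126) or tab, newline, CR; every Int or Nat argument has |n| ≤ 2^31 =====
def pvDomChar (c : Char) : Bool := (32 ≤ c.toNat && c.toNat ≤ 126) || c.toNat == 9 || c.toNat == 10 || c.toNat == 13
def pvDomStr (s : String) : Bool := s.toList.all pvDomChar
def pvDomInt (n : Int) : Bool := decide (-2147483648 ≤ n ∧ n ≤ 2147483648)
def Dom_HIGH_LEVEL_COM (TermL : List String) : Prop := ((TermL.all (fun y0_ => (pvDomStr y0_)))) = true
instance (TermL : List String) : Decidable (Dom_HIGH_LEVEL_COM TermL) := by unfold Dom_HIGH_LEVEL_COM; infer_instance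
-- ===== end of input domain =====

-- B replaces A's hand-written min-tracking loop (three mutable variables) by a filtered
-- candidate list and one `min(..., key=...)` call (objective: simpler/idiomatic; same cost).

-- ===== PORT A =====
def VEPTermL : List String := ["transcript_ablation", "splice_acceptor_variant", "splice_donor_variant",
  "stop_gained", "frameshift_variant", "stop_lost", "start_lost", "transcript_amplification",
  "inframe_insertion", "inframe_deletion", "missense_variant", "protein_altering_variant",
  "splice_region_variant", "incomplete_terminal_codon_variant", "start_retained_variant",
  "stop_retained_variant", "synonymous_variant", "coding_sequence_variant", "mature_miRNA_variant",
  "5_prime_UTR_variant", "3_prime_UTR_variant", "non_coding_transcript_exon_variant",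
  "intron_variant", "NMD_transcript_variant", "non_coding_transcript_variant",
  "upstream_gene_variant", "downstream_gene_variant", "TFBS_ablation", "TFBS_amplification",
  "TF_binding_site_variant", "regulatory_region_ablation", "regulatory_region_amplification",
  "feature_elongation", "regulatory_region_variant", "feature_truncation", "intergenic_variant"]

-- VEPTerm.index(t); Pre_ guarantees membership, so the default 0 is never reached on claimed inputs
def vepIndex (t : String) : Int := Int.ofNat ((PySem.List.index? VEPTermL t).getD 0)

-- loop body of A: state (TERM, TermIDX, TERMIDX), element (x, t)
def stepA (st : String × Int × Int) (p : Int × String) : String × Int × Int :=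
  if p.2 = "" then st
  else if st.1 = "" then (p.2, vepIndex p.2, p.1)
  else if vepIndex p.2 < st.2.1 then (p.2, vepIndex p.2, p.1)
  else st

def HIGH_LEVEL_COM (TermL : List String) : String × Int :=
  let st := (PySem.List.enumerate TermL).foldl stepA ("", 0, 0)
  (st.1, st.2.2)

-- ===== PORT B =====
def HIGH_LEVEL_COM_alt (TermL : List String) : String × Int :=
  let cands := (PySem.List.enumerate TermL).filter (fun c => c.2 != "")
  match PySem.List.min? cands (fun c => vepIndex c.2) with
  | none => ("", 0)
  | some (x, t) => (t, x)

-- ===== PRECONDITION & SPEC =====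
-- Pre_ excludes lists containing a nonempty term absent from VEPTerm: there Python A
-- (and Python B) raise ValueError from VEPTerm.index.
def Pre_HIGH_LEVEL_COM (TermL : List String) : Prop := ∀ t ∈ TermL, t ≠ "" → t ∈ VEPTermL
instance (TermL : List String) : Decidable (Pre_HIGH_LEVEL_COM TermL) := by unfold Pre_HIGH_LEVEL_COM; infer_instance
def pvWitness_HIGH_LEVEL_COM : List String := ["missense_variant", "", "stop_gained", "stop_gained"]
def Spec_HIGH_LEVEL_COM (TermL : List String) (out : String × Int) : Prop := out = HIGH_LEVEL_COM_alt TermL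
instance (TermL : List String) (out : String × Int) : Decidable (Spec_HIGH_LEVEL_COM TermL out) := by unfold Spec_HIGH_LEVEL_COM; infer_instance

-- ===== CLAIM (what is proved, stated in full; the proofs are below) =====
def Claim_equal_HIGH_LEVEL_COM : Prop := ∀ (TermL : List String), Dom_HIGH_LEVEL_COM TermL → Pre_HIGH_LEVEL_COM TermL → Spec_HIGH_LEVEL_COM TermL (HIGH_LEVEL_COM TermL)

-- ===== LEMMAS AND PROOFS =====

-- the inner step of Python's min(xs, key=k) on pairs, with k c = vepIndex c.2
def minstep (m c : Int × String) : Int × String :=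
  if vepIndex c.2 < vepIndex m.2 then c else m

theorem min?_cons_foldl (cs : List (Int × String)) :
    ∀ c : Int × String,
      PySem.List.min? (c :: cs) (fun p => vepIndex p.2) = some (cs.foldl minstep c) := by
  induction cs with
  | nil => intro c; simp [PySem.List.min?]
  | cons c cs ih =>
    intro m
    have key : PySem.List.min? (m :: c :: cs) (fun p => vepIndex p.2)
        = PySem.List.min? (minstep m c :: cs) (fun p => vepIndex p.2) := by
      by_cases h : vepIndex c.2 < vepIndex m.2 <;>
        simp [PySem.List.min?, List.foldl_cons, minstep, h]
    rw [key, ih (minstep m c)]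
    simp [List.foldl_cons]

theorem foldl_started (ps : List (Int × String)) :
    ∀ (x0 : Int) (t0 : String), t0 ≠ "" →
      ps.foldl stepA (t0, vepIndex t0, x0) =
        (let m := (ps.filter (fun c => c.2 != "")).foldl minstep (x0, t0)
         (m.2, vepIndex m.2, m.1)) := by
  induction ps with
  | nil => intro x0 t0 _; simp
  | cons p ps ih =>
    intro x0 t0 ht0
    by_cases hp : p.2 = ""
    · simp [stepA, hp, List.foldl_cons, ih x0 t0 ht0]
    · by_cases hlt : vepIndex p.2 < vepIndex t0
      · simp [stepA, hp, ht0, hlt, List.foldl_cons, minstep, ih p.1 p.2 hp]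
      · simp [stepA, hp, ht0, hlt, List.foldl_cons, minstep, ih x0 t0 ht0]

theorem foldl_unstarted (ps : List (Int × String)) :
    ps.foldl stepA ("", 0, 0) =
      (match ps.filter (fun c => c.2 != "") with
       | [] => ("", 0, 0)
       | c :: cs => (let m := cs.foldl minstep (c.1, c.2); (m.2, vepIndex m.2, m.1))) := by
  induction ps with
  | nil => simp
  | cons p ps ih =>
    by_cases hp : p.2 = ""
    · simp [stepA, hp, List.foldl_cons, ih]
    · simp [stepA, hp, List.foldl_cons, foldl_started ps p.1 p.2 hp]

-- ===== VERDICT (by name: the statement is the Claim_ definition above) =====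
theorem HIGH_LEVEL_COM_spec : Claim_equal_HIGH_LEVEL_COM := by
  intro TermL _ _
  unfold Spec_HIGH_LEVEL_COM HIGH_LEVEL_COM HIGH_LEVEL_COM_alt
  rw [foldl_unstarted]
  cases h : (PySem.List.enumerate TermL).filter (fun c => c.2 != "") with
  | nil => simp [PySem.List.min?]
  | cons c cs => simp [min?_cons_foldl]
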